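-- pv_equiv track=rewrite | github.com/assiadialeb/gitpulse | analytics/llm_service.py | _fallback_verdict
-- ===== SOURCE A (Python) =====
-- from typing import Dict, List, Optional
--
-- def _fallback_verdict(licenses: List[str]) -> str:
--     """Fallback verdict based on license analysis"""
--     if not licenses:
--         return 'Caution'
--
--     # Contaminating licenses that can require open-sourcing
--     contaminating_licenses = ['AGPL', 'GPL', 'LGPL', 'MPL', 'EPL', 'CDDL']
--
--     # Permissive licenses that allow commercial use
--     permissive_licenses = ['MIT', 'APACHE', 'BSD', 'ISC', 'UNLICENSE', '0BSD', 'CC0', 'WTFPL']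
--
--     # Check for contaminating licenses first
--     for license in licenses:
--         license_upper = license.upper()
--         if any(contaminating in license_upper for contaminating in contaminating_licenses):
--             return 'Not compatible'
--
--     # Check if all licenses are permissive
--     all_permissive = all(
--         any(permissive in license.upper() for permissive in permissive_licenses)
--         for license in licenses
--     )
--
--     if all_permissive:
--         return 'Compatible'
--     else:
--         return 'Caution'
-- ===== SOURCE B (Python) =====
-- def _fallback_verdict(licenses):
--     """Fallback verdict based on license analysis (single pass)."""
--     if not licenses:
--         return 'Caution'
--     contaminating_licenses = ['AGPL', 'GPL', 'LGPL', 'MPL', 'EPL', 'CDDL']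
--     permissive_licenses = ['MIT', 'APACHE', 'BSD', 'ISC', 'UNLICENSE', '0BSD', 'CC0', 'WTFPL']
--     all_permissive = True
--     for license in licenses:
--         u = license.upper()
--         if any(c in u for c in contaminating_licenses):
--             return 'Not compatible'
--         if not any(p in u for p in permissive_licenses):
--             all_permissive = False
--     return 'Compatible' if all_permissive else 'Caution'
-- ===== Notes on version B (the rewrite author's own statement) =====
-- stated objective: alternative
-- what changed: Replaces A's two separate scans (one for contaminating licenses, a second full pass computing all_permissive) with a single loop that uppercases each license once and maintains one all_permissive flag; equivalent because the contaminating verdict always dominates.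
import Mathlib
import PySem

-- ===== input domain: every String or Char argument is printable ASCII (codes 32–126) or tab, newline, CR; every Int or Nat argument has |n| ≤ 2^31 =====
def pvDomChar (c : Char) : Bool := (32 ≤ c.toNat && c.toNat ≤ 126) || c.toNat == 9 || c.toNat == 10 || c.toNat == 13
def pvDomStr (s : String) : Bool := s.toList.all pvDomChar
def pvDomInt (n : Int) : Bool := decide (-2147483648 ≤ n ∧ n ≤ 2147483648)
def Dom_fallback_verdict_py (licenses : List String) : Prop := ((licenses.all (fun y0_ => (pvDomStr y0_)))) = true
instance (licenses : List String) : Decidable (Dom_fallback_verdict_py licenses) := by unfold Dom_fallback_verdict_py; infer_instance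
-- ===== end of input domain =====

-- B merges A's two scans into one loop with a single all_permissive flag (return value only).
-- ===== PORT A =====
def pvContaminating : List String := ["AGPL", "GPL", "LGPL", "MPL", "EPL", "CDDL"]
def pvPermissive : List String := ["MIT", "APACHE", "BSD", "ISC", "UNLICENSE", "0BSD", "CC0", "WTFPL"]

-- A's first for-loop with early return: returns some "Not compatible" on a contaminating license
def pvAScan : List String → Option String
  | [] => none
  | l :: rest =>
    if pvContaminating.any (fun c => PySem.Str.isIn c (PySem.Str.upper l)) then
      some "Not compatible"
    else pvAScan rest

def fallback_verdict_py (licenses : List String) : String :=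
  if licenses = [] then "Caution"
  else
    match pvAScan licenses with
    | some s => s
    | none =>
      let all_permissive := licenses.all
        (fun l => pvPermissive.any (fun p => PySem.Str.isIn p (PySem.Str.upper l)))
      if all_permissive then "Compatible" else "Caution"

-- ===== PORT B =====
def pvBLoop : List String → Bool → String
  | [], allPerm => if allPerm then "Compatible" else "Caution"
  | l :: rest, allPerm =>
    let u := PySem.Str.upper l
    if pvContaminating.any (fun c => PySem.Str.isIn c u) then "Not compatible"
    else pvBLoop rest (allPerm && pvPermissive.any (fun p => PySem.Str.isIn p u))

def fallback_verdict_py_alt (licenses : List String) : String :=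
  if licenses = [] then "Caution"
  else pvBLoop licenses true

-- ===== PRECONDITION & SPEC =====
def Spec_fallback_verdict_py (licenses : List String) (out : String) : Prop := out = fallback_verdict_py_alt licenses
instance (licenses : List String) (out : String) : Decidable (Spec_fallback_verdict_py licenses out) := by unfold Spec_fallback_verdict_py; infer_instance

-- ===== CLAIM (what is proved, stated in full; the proofs are below) =====
def Claim_equal_fallback_verdict_py : Prop := ∀ (licenses : List String), Dom_fallback_verdict_py licenses → Spec_fallback_verdict_py licenses (fallback_verdict_py licenses)

-- ===== LEMMAS AND PROOFS =====
theorem pvLoop_eq (ls : List String) (b : Bool) :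
    (match pvAScan ls with
     | some s => s
     | none => if b && ls.all (fun l => pvPermissive.any (fun p => PySem.Str.isIn p (PySem.Str.upper l)))
               then "Compatible" else "Caution") = pvBLoop ls b := by
  induction ls generalizing b with
  | nil => simp [pvAScan, pvBLoop]
  | cons l rest ih =>
    by_cases h : (pvContaminating.any fun c => PySem.Str.isIn c (PySem.Str.upper l)) = true
    · simp only [pvAScan, pvBLoop, if_pos h]
    · simp only [pvAScan, pvBLoop, if_neg h, List.all_cons, ← Bool.and_assoc]
      exact ih _

-- ===== VERDICT (by name: the statement is the Claim_ definition above) =====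
theorem fallback_verdict_py_spec : Claim_equal_fallback_verdict_py := by
  intro licenses _
  unfold Spec_fallback_verdict_py fallback_verdict_py fallback_verdict_py_alt
  by_cases h : licenses = []
  · simp [h]
  · rw [if_neg h, if_neg h]
    simpa using pvLoop_eq licenses true
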